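-- pv_equiv track=rewrite | github.com/onyuki/1400-zadach-po-programmirivaniu | 7.162-7.181.py | adjacent_sums_info
-- ===== SOURCE A (Python) =====
-- from typing import List, Tuple
-- from typing import List, Tuple
-- import math
--
-- def adjacent_sums_info(nums: List[int]) -> Tuple[int, int, Tuple[int,int], Tuple[int,int]]:
--     n = len(nums)
--     if n < 2:
--         raise ValueError("Нужно как минимум 2 числа")
--     max_sum = -math.inf
--     min_sum = math.inf
--     max_pos = (1,2)
--     min_pos = (1,2)
--     for i in range(n - 1):
--         s = nums[i] + nums[i+1]
--         if s > max_sum: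
--             max_sum = s
--             max_pos = (i+1, i+2)
--         if s <= min_sum:
--             min_sum = s
--             min_pos = (i+1, i+2)
--     return max_sum, min_sum, max_pos, min_pos
-- ===== SOURCE B (Python) =====
-- from typing import List, Tuple
--
-- def adjacent_sums_info(nums: List[int]) -> Tuple[int, int, Tuple[int, int], Tuple[int, int]]:
--     if len(nums) < 2:
--         raise ValueError("Нужно как минимум 2 числа")
--     sums = [a + b for a, b in zip(nums, nums[1:])]
--     max_sum = max(sums)
--     min_sum = min(sums)
--     i = sums.index(max_sum)                       # first maximal pair (A updates on strict >)
--     j = len(sums) - 1 - sums[::-1].index(min_sum) # last minimal pair (A updates on <=)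
--     return max_sum, min_sum, (i + 1, i + 2), (j + 1, j + 2)
-- ===== Notes on version B (the rewrite author's own statement) =====
-- stated objective: alternative
-- what changed: Replaced the single tracking loop with running max/min/position state by building the adjacent-sums list once and recovering values with max()/min() and positions with index() on the list (first maximum) and on its reversal (last minimum).
import Mathlib
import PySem

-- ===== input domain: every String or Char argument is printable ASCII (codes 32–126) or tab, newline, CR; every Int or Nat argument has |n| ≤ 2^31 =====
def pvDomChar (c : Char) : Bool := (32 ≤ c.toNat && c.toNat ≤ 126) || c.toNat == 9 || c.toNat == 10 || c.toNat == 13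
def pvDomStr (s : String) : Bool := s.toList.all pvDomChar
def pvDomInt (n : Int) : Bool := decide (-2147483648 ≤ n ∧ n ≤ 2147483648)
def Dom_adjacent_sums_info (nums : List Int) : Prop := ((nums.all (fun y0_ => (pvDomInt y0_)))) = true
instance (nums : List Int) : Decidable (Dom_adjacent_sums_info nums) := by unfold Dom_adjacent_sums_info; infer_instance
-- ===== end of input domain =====

-- B builds the adjacent-sums list once and recovers values with max/min and positions with
-- first-index / last-index lookups; same O(n) cost, different decomposition.

-- ===== PORT A =====
-- -inf / +inf sentinels are modelled by 'none': 's > -inf' and 's <= inf' are always true,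
-- which is exactly 'Option.all' on 'none'; inside Pre_ the loop runs at least once.
def adjacent_sums_info (nums : List Int) : Int × Int × (Int × Int) × (Int × Int) :=
  let n : Int := (nums.length : Int)
  -- n < 2: Python raises ValueError — excluded by Pre_
  let st :=
    (PySem.List.pyRange 0 (n - 1) 1).foldl
      (fun (st : Option Int × Option Int × (Int × Int) × (Int × Int)) i =>
        let s := PySem.List.pyGetD nums i 0 + PySem.List.pyGetD nums (i + 1) 0
        let st1 := if st.1.all (fun v => v < s) then (some s, st.2.1, (i + 1, i + 2), st.2.2.2) else st
        if st1.2.1.all (fun v => s ≤ v) then (st1.1, some s, st1.2.2.1, (i + 1, i + 2)) else st1)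
      (none, none, (1, 2), (1, 2))
  (st.1.getD 0, st.2.1.getD 0, st.2.2.1, st.2.2.2)

-- ===== PORT B =====
def adjacent_sums_info_alt (nums : List Int) : Int × Int × (Int × Int) × (Int × Int) :=
  -- len(nums) < 2: Python raises ValueError — excluded by Pre_
  let sums := (nums.zip (PySem.List.slice nums (some 1) none)).map (fun p => p.1 + p.2)
  let maxSum := (PySem.List.max? sums (fun x => x)).getD 0
  let minSum := (PySem.List.min? sums (fun x => x)).getD 0
  let i : Nat := (PySem.List.index? sums maxSum).getD 0
  let j : Nat := sums.length - 1 - (PySem.List.index? ((PySem.List.slice? sums none none (-1)).getD []) minSum).getD 0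
  (maxSum, minSum, ((i : Int) + 1, (i : Int) + 2), ((j : Int) + 1, (j : Int) + 2))

-- ===== PRECONDITION & SPEC =====
-- Pre_: exactly the inputs on which A returns (A raises ValueError when len(nums) < 2)
def Pre_adjacent_sums_info (nums : List Int) : Prop := 2 ≤ nums.length
instance (nums : List Int) : Decidable (Pre_adjacent_sums_info nums) := by unfold Pre_adjacent_sums_info; infer_instance
def pvWitness_adjacent_sums_info : List Int := [1, 2]
def Spec_adjacent_sums_info (nums : List Int) (out : Int × Int × (Int × Int) × (Int × Int)) : Prop := out = adjacent_sums_info_alt nums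
instance (nums : List Int) (out : Int × Int × (Int × Int) × (Int × Int)) : Decidable (Spec_adjacent_sums_info nums out) := by unfold Spec_adjacent_sums_info; infer_instance

-- ===== CLAIM (what is proved, stated in full; the proofs are below) =====
def Claim_equal_adjacent_sums_info : Prop := ∀ (nums : List Int), Dom_adjacent_sums_info nums → Pre_adjacent_sums_info nums → Spec_adjacent_sums_info nums (adjacent_sums_info nums)

-- ===== LEMMAS AND PROOFS =====

theorem pvFoldlMin_le (t : List Int) : ∀ x : Int, t.foldl min x ≤ x := by
  induction t with
  | nil => intro x; simp
  | cons s t ih => intro x; simpa using le_trans (ih (min x s)) (min_le_left x s)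

theorem pvFoldlMin_mem (t : List Int) : ∀ x : Int, t.foldl min x = x ∨ t.foldl min x ∈ t := by
  induction t with
  | nil => intro x; simp
  | cons s t ih =>
    intro x
    simp only [List.foldl_cons]
    rcases ih (min x s) with h | h
    · rcases min_choice x s with h2 | h2 <;> rw [h2] at h <;> simp [h2, h]
    · simp [h]

theorem pvFoldlMax_mem (t : List Int) : ∀ x : Int, t.foldl max x = x ∨ t.foldl max x ∈ t := by
  induction t with
  | nil => intro x; simp
  | cons s t ih =>
    intro x
    simp only [List.foldl_cons]
    rcases ih (max x s) with h | h
    · rcases max_choice x s with h2 | h2 <;> rw [h2] at h <;> simp [h2, h]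
    · simp [h]

-- A's loop step, abstracted over the (index, adjacent-sum) pair
def pvStep (st : Option Int × Option Int × (Int × Int) × (Int × Int)) (p : Int × Int) :
    Option Int × Option Int × (Int × Int) × (Int × Int) :=
  let i := p.1; let s := p.2
  let st1 := if st.1.all (fun v => v < s) then (some s, st.2.1, (i + 1, i + 2), st.2.2.2) else st
  if st1.2.1.all (fun v => s ≤ v) then (st1.1, some s, st1.2.2.1, (i + 1, i + 2)) else st1

-- closed form of A's loop state once both trackers hold a value
def pvOut (t : List Int) (a m : Int) (p : Int × Int) (q : Int) (qp : Int × Int) :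
    Option Int × Option Int × (Int × Int) × (Int × Int) :=
  let M := t.foldl max m
  let N := t.foldl min q
  let k : Int := ((PySem.List.index? t M).getD 0 : Nat)
  let r : Int := ((t.length - 1 - (PySem.List.index? t.reverse N).getD 0 : Nat) : Nat)
  (some M, some N,
    (if m < M then (a + k + 1, a + k + 2) else p),
    (if N ∈ t then (a + r + 1, a + r + 2) else qp))

theorem pvStep_state (m q : Int) (p qp : Int × Int) (a s : Int) :
    pvStep (some m, some q, p, qp) (a, s) =
      (some (max m s), some (min q s), (if m < s then (a+1,a+2) else p), (if s ≤ q then (a+1,a+2) else qp)) := by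
  simp only [pvStep, Option.all_some]
  split_ifs with h1 h2 h2 <;> simp_all <;> omega

theorem pvMaxPos (s : Int) (t : List Int) (a m : Int) (p : Int × Int) :
    (if max m s < t.foldl max (max m s) then
        (a + 1 + ((PySem.List.index? t (t.foldl max (max m s))).getD 0 : Nat) + 1,
         a + 1 + ((PySem.List.index? t (t.foldl max (max m s))).getD 0 : Nat) + 2)
      else if m < s then (a+1,a+2) else p)
    = (if m < t.foldl max (max m s) then
        (a + ((PySem.List.index? (s::t) (t.foldl max (max m s))).getD 0 : Nat) + 1,
         a + ((PySem.List.index? (s::t) (t.foldl max (max m s))).getD 0 : Nat) + 2)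
      else p) := by
  set M := t.foldl max (max m s) with hM
  have hle : max m s ≤ M := (PySem.List.le_foldl_max t (max m s)).1
  by_cases h1 : max m s < M
  · have hmem : M ∈ t := by
      rcases pvFoldlMax_mem t (max m s) with h | h
      · omega
      · exact h
    obtain ⟨k0, hk0⟩ := Option.isSome_iff_exists.mp ((PySem.List.index?_isSome_iff t M).mpr hmem)
    have hne : s ≠ M := by have := le_max_right m s; omega
    rw [if_pos h1, if_pos (by have := le_max_left m s; omega : m < M),
        PySem.List.index?_cons_of_ne t hne, hk0]
    simp only [Option.map_some, Option.getD_some]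
    push_cast
    refine Prod.ext ?_ ?_ <;> simp <;> ring
  · have hMe : M = max m s := by omega
    by_cases h2 : m < s
    · have hMs : M = s := by rw [hMe]; omega
      rw [if_neg h1, if_pos h2, if_pos (by omega : m < M), hMs, PySem.List.index?_cons_self]
      norm_num
    · have hMm : M = m := by rw [hMe]; omega
      rw [if_neg h1, if_neg h2, if_neg (by omega : ¬ m < M)]

theorem pvMinPos (s : Int) (t : List Int) (a q : Int) (qp : Int × Int) :
    (if t.foldl min (min q s) ∈ t then
        (a + 1 + ((t.length - 1 - (PySem.List.index? t.reverse (t.foldl min (min q s))).getD 0 : Nat) : Nat) + 1,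
         a + 1 + ((t.length - 1 - (PySem.List.index? t.reverse (t.foldl min (min q s))).getD 0 : Nat) : Nat) + 2)
      else if s ≤ q then (a+1,a+2) else qp)
    = (if t.foldl min (min q s) ∈ s::t then
        (a + (((s::t).length - 1 - (PySem.List.index? (s::t).reverse (t.foldl min (min q s))).getD 0 : Nat) : Nat) + 1,
         a + (((s::t).length - 1 - (PySem.List.index? (s::t).reverse (t.foldl min (min q s))).getD 0 : Nat) : Nat) + 2)
      else qp) := by
  set N := t.foldl min (min q s) with hN
  have hle : N ≤ min q s := pvFoldlMin_le t (min q s)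
  rw [List.reverse_cons]
  by_cases hmem : N ∈ t
  · have hmemr : N ∈ t.reverse := List.mem_reverse.mpr hmem
    obtain ⟨k0, hk0⟩ := Option.isSome_iff_exists.mp ((PySem.List.index?_isSome_iff t.reverse N).mpr hmemr)
    obtain ⟨hk0lt, -⟩ := PySem.List.getElem_of_index?_eq_some hk0
    rw [List.length_reverse] at hk0lt
    rw [if_pos hmem, if_pos (List.mem_cons_of_mem s hmem),
        PySem.List.index?_append_of_mem [s] hmemr, hk0]
    simp only [Option.getD_some, List.length_cons]
    have h1 : (t.length + 1 - 1 - k0 : Nat) = (t.length - 1 - k0 : Nat) + 1 := by omega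
    rw [h1]
    push_cast
    refine Prod.ext ?_ ?_ <;> simp <;> ring
  · have hNe : N = min q s := by
      rcases pvFoldlMin_mem t (min q s) with h | h
      · exact h
      · exact absurd h hmem
    by_cases h2 : s ≤ q
    · have hNs : N = s := by rw [hNe]; omega
      have hsnr : s ∉ t.reverse := by rw [List.mem_reverse]; rw [hNs] at hmem; exact hmem
      rw [if_neg hmem, if_pos h2, hNs, if_pos (List.mem_cons_self),
          PySem.List.index?_append_singleton_self t.reverse s hsnr]
      simp only [Option.getD_some, List.length_cons, List.length_reverse]
      have h1 : (t.length + 1 - 1 - t.length : Nat) = 0 := by omega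
      rw [h1]
      norm_num
    · have hNq : N = q := by rw [hNe]; omega
      have hns : N ∉ s :: t := by
        intro hc
        rcases List.mem_cons.mp hc with h | h
        · omega
        · exact hmem h
      rw [if_neg hmem, if_neg h2, if_neg hns]

theorem pvLoop (t : List Int) : ∀ (a m : Int) (p : Int × Int) (q : Int) (qp : Int × Int),
    (PySem.List.enumerate t a).foldl pvStep (some m, some q, p, qp) = pvOut t a m p q qp := by
  induction t with
  | nil => intro a m p q qp; simp [PySem.List.enumerate, pvOut]
  | cons s t ih =>
    intro a m p q qp
    rw [show PySem.List.enumerate (s::t) a = (a,s) :: PySem.List.enumerate t (a+1) from rfl,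
        List.foldl_cons, pvStep_state, ih]
    simp only [pvOut, List.foldl_cons, Prod.mk.injEq]
    exact ⟨trivial, trivial, pvMaxPos s t a m p, pvMinPos s t a q qp⟩

def pvSums (nums : List Int) : List Int := (nums.zip nums.tail).map (fun p => p.1 + p.2)

def pvFinal (st : Option Int × Option Int × (Int × Int) × (Int × Int)) :
    Int × Int × (Int × Int) × (Int × Int) := (st.1.getD 0, st.2.1.getD 0, st.2.2.1, st.2.2.2)

theorem pvSums_length (nums : List Int) : (pvSums nums).length = nums.length - 1 := by
  simp [pvSums]

theorem pvSums_get (nums : List Int) (j : Nat) (hj : j < nums.length - 1) :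
    (pvSums nums)[j]'(by rw [pvSums_length]; omega) =
      nums[j]'(by omega) + nums[j+1]'(by omega) := by
  simp [pvSums, List.getElem_zip, List.getElem_tail]

-- A's loop over indices IS the pvStep-fold over the enumerated adjacent-sums list
theorem pvA_eq (nums : List Int) (h : 2 ≤ nums.length) :
    adjacent_sums_info nums =
      pvFinal ((PySem.List.enumerate (pvSums nums) 0).foldl pvStep (none, none, (1, 2), (1, 2))) := by
  have h1 : adjacent_sums_info nums =
      pvFinal ((PySem.List.pyRange 0 ((nums.length : Int) - 1) 1).foldl
        (fun st i => pvStep st (i, PySem.List.pyGetD nums i 0 + PySem.List.pyGetD nums (i + 1) 0))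
        (none, none, (1, 2), (1, 2))) := rfl
  rw [h1]
  refine congrArg pvFinal ?_
  rw [PySem.List.enumerate_eq_map_pyRange (pvSums nums) 0, List.foldl_map,
      PySem.List.len_eq, pvSums_length]
  have hcast : ((nums.length - 1 : Nat) : Int) = (nums.length : Int) - 1 := by omega
  rw [hcast]
  refine PySem.List.foldl_congr_mem _ _ _ _ ?_
  intro acc j hj
  obtain ⟨hj0, hj1⟩ := PySem.List.mem_pyRange_one.mp hj
  have hjn : j.toNat < nums.length - 1 := by omega
  have e1 : PySem.List.pyGetD nums j 0 = nums[j.toNat]'(by omega) :=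
    PySem.List.pyGetD_eq_getElem nums 0 hj0 (by omega)
  have e2 : PySem.List.pyGetD nums (j + 1) 0 = nums[j.toNat + 1]'(by omega) := by
    have := PySem.List.pyGetD_eq_getElem nums 0 (by omega : (0:Int) ≤ j + 1) (by omega : j + 1 < (nums.length : Int))
    rw [this]
    congr 1
    omega
  have e3 : PySem.List.pyGetD (pvSums nums) j 0 = (pvSums nums)[j.toNat]'(by rw [pvSums_length]; omega) :=
    PySem.List.pyGetD_eq_getElem (pvSums nums) 0 hj0 (by rw [pvSums_length]; omega)
  rw [e1, e2, e3, pvSums_get nums j.toNat hjn]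

-- the first-index position of the running maximum over the whole list s :: t
theorem pvBmax (s : Int) (t : List Int) :
    (if s < t.foldl max s then
        ((1:Int) + ((PySem.List.index? t (t.foldl max s)).getD 0 : Nat) + 1,
         (1:Int) + ((PySem.List.index? t (t.foldl max s)).getD 0 : Nat) + 2)
      else ((1:Int), (2:Int)))
    = ((((PySem.List.index? (s::t) (t.foldl max s)).getD 0 : Nat) : Int) + 1,
       (((PySem.List.index? (s::t) (t.foldl max s)).getD 0 : Nat) : Int) + 2) := by
  set M := t.foldl max s with hM
  have hle : s ≤ M := (PySem.List.le_foldl_max t s).1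
  by_cases h1 : s < M
  · have hmem : M ∈ t := by
      rcases pvFoldlMax_mem t s with h | h
      · omega
      · exact h
    obtain ⟨k0, hk0⟩ := Option.isSome_iff_exists.mp ((PySem.List.index?_isSome_iff t M).mpr hmem)
    rw [if_pos h1, PySem.List.index?_cons_of_ne t (by omega : s ≠ M), hk0]
    simp only [Option.map_some, Option.getD_some]
    push_cast
    refine Prod.ext ?_ ?_ <;> simp <;> ring
  · have hMs : M = s := by omega
    rw [if_neg h1, hMs, PySem.List.index?_cons_self]
    norm_num

-- the last-index position of the running minimum over the whole list s :: t
theorem pvBmin (s : Int) (t : List Int) :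
    (if t.foldl min s ∈ t then
        ((1:Int) + ((t.length - 1 - (PySem.List.index? t.reverse (t.foldl min s)).getD 0 : Nat) : Nat) + 1,
         (1:Int) + ((t.length - 1 - (PySem.List.index? t.reverse (t.foldl min s)).getD 0 : Nat) : Nat) + 2)
      else ((1:Int), (2:Int)))
    = (((((s::t).length - 1 - (PySem.List.index? (s::t).reverse (t.foldl min s)).getD 0 : Nat) : Nat) : Int) + 1,
       ((((s::t).length - 1 - (PySem.List.index? (s::t).reverse (t.foldl min s)).getD 0 : Nat) : Nat) : Int) + 2) := by
  set N := t.foldl min s with hN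
  rw [List.reverse_cons]
  by_cases hmem : N ∈ t
  · have hmemr : N ∈ t.reverse := List.mem_reverse.mpr hmem
    obtain ⟨k0, hk0⟩ := Option.isSome_iff_exists.mp ((PySem.List.index?_isSome_iff t.reverse N).mpr hmemr)
    obtain ⟨hk0lt, -⟩ := PySem.List.getElem_of_index?_eq_some hk0
    rw [List.length_reverse] at hk0lt
    rw [if_pos hmem, PySem.List.index?_append_of_mem [s] hmemr, hk0]
    simp only [Option.getD_some, List.length_cons]
    have h1 : (t.length + 1 - 1 - k0 : Nat) = (t.length - 1 - k0 : Nat) + 1 := by omega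
    rw [h1]
    push_cast
    refine Prod.ext ?_ ?_ <;> simp <;> ring
  · have hNs : N = s := by
      rcases pvFoldlMin_mem t s with h | h
      · exact h
      · exact absurd h hmem
    have hsnr : s ∉ t.reverse := by rw [List.mem_reverse]; rw [hNs] at hmem; exact hmem
    rw [if_neg hmem, hNs, PySem.List.index?_append_singleton_self t.reverse s hsnr]
    simp only [Option.getD_some, List.length_cons, List.length_reverse]
    have h1 : (t.length + 1 - 1 - t.length : Nat) = 0 := by omega
    rw [h1]
    norm_num

-- ===== VERDICT (by name: the statement is the Claim_ definition above) =====
theorem adjacent_sums_info_spec : Claim_equal_adjacent_sums_info := by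
  intro nums _ hpre
  unfold Spec_adjacent_sums_info
  have h : 2 ≤ nums.length := hpre
  obtain ⟨s, t, hS⟩ : ∃ s t, pvSums nums = s :: t := by
    have hl := pvSums_length nums
    cases hp : pvSums nums with
    | nil => rw [hp] at hl; simp at hl; omega
    | cons a b => exact ⟨a, b, rfl⟩
  -- left side: A's loop in closed form
  rw [pvA_eq nums h, hS]
  have hfold : (PySem.List.enumerate (s::t) 0).foldl pvStep (none, none, (1, 2), (1, 2)) =
      pvOut t 1 s (1, 2) s (1, 2) := by
    rw [show PySem.List.enumerate (s::t) 0 = (0, s) :: PySem.List.enumerate t 1 from rfl,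
        List.foldl_cons, show pvStep (none, none, ((1:Int), (2:Int)), ((1:Int), (2:Int))) (0, s) =
          (some s, some s, (1, 2), (1, 2)) from rfl, pvLoop]
  rw [hfold]
  -- right side: B on the same sums list
  have hB : adjacent_sums_info_alt nums =
      (let sums := s :: t
       let maxSum := (PySem.List.max? sums (fun x => x)).getD 0
       let minSum := (PySem.List.min? sums (fun x => x)).getD 0
       let i : Nat := (PySem.List.index? sums maxSum).getD 0
       let j : Nat := sums.length - 1 - (PySem.List.index? sums.reverse minSum).getD 0
       ((maxSum, minSum, ((i : Int) + 1, (i : Int) + 2), ((j : Int) + 1, (j : Int) + 2)) :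
         Int × Int × (Int × Int) × (Int × Int))) := by
    simp only [adjacent_sums_info_alt, PySem.List.slice_from_one,
      PySem.List.slice?_none_none_neg_one, Option.getD_some]
    rw [show (nums.zip nums.tail).map (fun p => p.1 + p.2) = pvSums nums from rfl, hS]
  rw [hB]
  simp only [PySem.List.max?_id_cons, PySem.List.min?_id_cons, Option.getD_some]
  simp only [pvOut, pvFinal, Option.getD_some, Prod.mk.injEq]
  exact ⟨trivial, trivial, pvBmax s t, pvBmin s t⟩
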